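-- pv_equiv track=rewrite | github.com/crapas1974/algo2 | result/path/07_max_stimulated copy.py | max_stimulation
-- ===== SOURCE A (Python) =====
-- def get_grid_value(i, j, grid):
--     if i < 0 or j < 0:
--         return 0
--     if i >= len(grid[0]) or j >= len(grid):
--         return 0
--     return grid[j][i]
--
-- def max_stimulation(n, m, init_stimulation, grid):
--     # 흥분도 변화량을 저장하는 grid of stimulation 배열을 생성한다.
--     grid_st = [[0] * n for _ in range(m)]
--     for i in range(n):
--         for j in range(m):
--             grid_st[j][i] = get_grid_value(i - 1, j, grid) + get_grid_value(i + 1, j, grid) + \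
--                             get_grid_value(i, j - 1, grid) + get_grid_value(i, j + 1, grid) - \
--                             4 * grid[j][i]
--
--     # 최대흥분도합을 저장할 배열
--     # - 셀 (i, j)의 최대경로합은 mps[j][i]에 저장한다.
--     max_ps = [[0] * n for _ in range(m)]
--     min_ps = [[0] * n for _ in range(m)]
--
--
--
--     # 초기값 설정
--     max_ps[0][0] = min_ps[0][0] = max(grid_st[0][0] + init_stimulation, 0)
--
--     for i in range(n):
--         for j in range(m):
--             if i == 0 and j == 0:
--                 continue
--             if i == 0:      # 가장 왼쪽 열
--                 max_ps[j][0] = min_ps[j][0] = max_ps[j - 1][0] + grid_st[j][0]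
--             elif j == 0:    # 가장 위쪽 행
--                 max_ps[0][i] = min_ps[0][i] = max_ps[0][i - 1] + grid_st[0][i]
--             else:
--                 max_ps[j][i] = max(max_ps[j - 1][i], max_ps[j][i - 1]) + grid_st[j][i]
--                 min_ps[j][i] = min(min_ps[j - 1][i], min_ps[j][i - 1]) + grid_st[j][i]
--             # 각 셀에서의 바이러스 흥분도는 0 이하로 내려갈 수 없다.
--             max_ps[j][i] = max(max_ps[j][i], 0)
--             min_ps[j][i] = max(min_ps[j][i], 0)
--
--
--     # 순간 최대 흥분도는 각 셀에서의 최대 흥분도 중 최대값이다.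
--     max_stimulation = max([max(row) for row in max_ps])
--     min_stimulation = min([min(row) for row in min_ps])
--
--
--     return max_stimulation, min_stimulation
-- ===== SOURCE B (Python) =====
-- def max_stimulation(n, m, init_stimulation, grid):
--     # Top-down memoized recursion: the path value of each cell is defined by a
--     # recursive function (with the stencil computed inline from the original
--     # grid) and cached in a dict; no grid_st/max_ps/min_ps tables are built.
--     memo = {}
--
--     def gv(i, j):
--         if i < 0 or j < 0:
--             return 0
--         if i >= len(grid[0]) or j >= len(grid):
--             return 0
--         return grid[j][i]
--
--     def rec(i, j):
--         if (i, j) in memo: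
--             return memo[(i, j)]
--         s = gv(i - 1, j) + gv(i + 1, j) + gv(i, j - 1) + gv(i, j + 1) - 4 * grid[j][i]
--         if i == 0 and j == 0:
--             v = max(s + init_stimulation, 0)
--             r = (v, v)
--         elif i == 0:
--             v = max(rec(0, j - 1)[0] + s, 0)
--             r = (v, v)
--         elif j == 0:
--             v = max(rec(i - 1, 0)[0] + s, 0)
--             r = (v, v)
--         else:
--             up = rec(i, j - 1)
--             left = rec(i - 1, j)
--             r = (max(max(up[0], left[0]) + s, 0), max(min(up[1], left[1]) + s, 0))
--         memo[(i, j)] = r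
--         return r
--
--     hi = max(max(rec(i, j)[0] for i in range(n)) for j in range(m))
--     lo = min(min(rec(i, j)[1] for i in range(n)) for j in range(m))
--     return hi, lo
-- ===== Notes on version B (the rewrite author's own statement) =====
-- stated objective: alternative
-- what changed: B replaces A's bottom-up in-place table DP (grid_st plus full max_ps/min_ps grids mutated cell by cell, then a final double scan) with a top-down recursive definition of each cell's (max,min) path value, memoized in a dict, with the stencil computed inline; the answers are max/min over the recursion's values.
import Mathlib
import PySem

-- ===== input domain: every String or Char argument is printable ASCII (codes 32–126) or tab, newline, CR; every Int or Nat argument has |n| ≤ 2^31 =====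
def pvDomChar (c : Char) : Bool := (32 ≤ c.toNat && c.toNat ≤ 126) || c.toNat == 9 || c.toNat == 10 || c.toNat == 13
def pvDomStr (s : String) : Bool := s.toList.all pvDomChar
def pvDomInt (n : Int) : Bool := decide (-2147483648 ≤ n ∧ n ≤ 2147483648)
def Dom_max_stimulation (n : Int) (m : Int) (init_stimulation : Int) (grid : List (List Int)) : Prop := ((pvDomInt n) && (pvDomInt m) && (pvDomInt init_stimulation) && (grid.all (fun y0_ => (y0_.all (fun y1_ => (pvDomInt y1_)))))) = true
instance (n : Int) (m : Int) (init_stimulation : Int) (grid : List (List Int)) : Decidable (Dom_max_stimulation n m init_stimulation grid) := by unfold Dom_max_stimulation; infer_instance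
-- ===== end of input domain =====

-- B replaces A's bottom-up in-place table DP with a top-down memoized recursion
-- defining each cell's (max, min) path value (objective: alternative decomposition, not speed).

-- ===== PORT A =====

-- get_grid_value: 0 outside the [0,len(grid[0])) x [0,len(grid)) box, else grid[j][i]
-- (grid[j][i] is ported with getD 0; Python raises exactly where Pre_ fails, where the
-- guarded index can still fall outside a ragged shorter row).
def get_grid_value (i : Int) (j : Int) (grid : List (List Int)) : Int :=
  if i < 0 ∨ j < 0 then 0
  else if ((grid.headD []).length : Int) ≤ i ∨ (grid.length : Int) ≤ j then 0
  else (grid.getD j.toNat []).getD i.toNat 0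

-- Python 't[j][i] = v' (indices are always in range inside Pre_; List.set is a no-op outside).
def pySet2 (t : List (List Int)) (j : Nat) (i : Nat) (v : Int) : List (List Int) :=
  t.set j ((t.getD j []).set i v)

-- range(n)/range(m) iterate the naturals 0..n-1 / 0..m-1 (empty for non-positive bounds),
-- kept as Nat indices.  Each Python 'for' loop is a named fold below.

-- inner loop of the grid_st fill, at column i: 'for j in range(J): grid_st[j][i] = ...'
def aFillRow (grid : List (List Int)) (i : Nat) (J : Nat) (g : List (List Int)) : List (List Int) :=
  (List.range J).foldl (fun g j =>
    pySet2 g j i (get_grid_value ((i : Int) - 1) (j : Int) grid + get_grid_value ((i : Int) + 1) (j : Int) grid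
      + get_grid_value (i : Int) ((j : Int) - 1) grid + get_grid_value (i : Int) ((j : Int) + 1) grid
      - 4 * ((grid.getD j []).getD i 0))) g

-- the grid_st construction: 'grid_st = [[0]*n for _ in range(m)]' then the double loop
def aFill (grid : List (List Int)) (N M : Nat) : List (List Int) :=
  (List.range N).foldl (fun g i => aFillRow grid i M g)
    (List.replicate M (List.replicate N (0 : Int)))

-- inner loop of the DP fill, at column i: the Python branch structure kept verbatim
def aCol (gst : List (List Int)) (i : Nat) (J : Nat)
    (t0 : List (List Int) × List (List Int)) : List (List Int) × List (List Int) :=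
  (List.range J).foldl (fun (t : List (List Int) × List (List Int)) j =>
    if i = 0 ∧ j = 0 then t
    else
      let t1 :=
        if i = 0 then
          let v := (t.1.getD (j - 1) []).getD 0 0 + (gst.getD j []).getD 0 0
          (pySet2 t.1 j 0 v, pySet2 t.2 j 0 v)
        else if j = 0 then
          let v := (t.1.getD 0 []).getD (i - 1) 0 + (gst.getD 0 []).getD i 0
          (pySet2 t.1 0 i v, pySet2 t.2 0 i v)
        else
          (pySet2 t.1 j i (max ((t.1.getD (j - 1) []).getD i 0) ((t.1.getD j []).getD (i - 1) 0)
             + (gst.getD j []).getD i 0),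
           pySet2 t.2 j i (min ((t.2.getD (j - 1) []).getD i 0) ((t.2.getD j []).getD (i - 1) 0)
             + (gst.getD j []).getD i 0))
      (pySet2 t1.1 j i (max ((t1.1.getD j []).getD i 0) 0),
       pySet2 t1.2 j i (max ((t1.2.getD j []).getD i 0) 0))) t0

def aLoop (gst : List (List Int)) (N M : Nat)
    (t0 : List (List Int) × List (List Int)) : List (List Int) × List (List Int) :=
  (List.range N).foldl (fun t i => aCol gst i M t) t0

-- literal port of A: build grid_st, fill the two full DP tables in place, then scan them.
-- max()/min() over a list is PySem.List.max?/min? (the getD 0 is unreachable inside Pre_).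
def max_stimulation (n : Int) (m : Int) (init_stimulation : Int) (grid : List (List Int)) : Int × Int :=
  let grid_st := aFill grid n.toNat m.toNat
  let c := max ((grid_st.getD 0 []).getD 0 0 + init_stimulation) 0
  let max_ps := pySet2 (List.replicate m.toNat (List.replicate n.toNat (0 : Int))) 0 0 c
  let min_ps := pySet2 (List.replicate m.toNat (List.replicate n.toNat (0 : Int))) 0 0 c
  let tabs := aLoop grid_st n.toNat m.toNat (max_ps, min_ps)
  ((PySem.List.max? (tabs.1.map (fun row => (PySem.List.max? row (fun y => y)).getD 0)) (fun y => y)).getD 0,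
   (PySem.List.min? (tabs.2.map (fun row => (PySem.List.min? row (fun y => y)).getD 0)) (fun y => y)).getD 0)

-- ===== PORT B =====

-- Source B's local gv(i, j) (same reading discipline as the module helper).
def alt_gv (i : Int) (j : Int) (grid : List (List Int)) : Int :=
  if i < 0 ∨ j < 0 then 0
  else if ((grid.headD []).length : Int) ≤ i ∨ (grid.length : Int) ≤ j then 0
  else (grid.getD j.toNat []).getD i.toNat 0

-- Source B's rec(i, j): the (max, min) path value of cell (column i, row j), defined by
-- recursion with the stencil s computed inline.  The Python memo dict is an
-- operationally transparent cache; the port is the recursion itself.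
def bRec (grid : List (List Int)) (init : Int) : Nat → Nat → Int × Int
  | 0, 0 =>
      let s := alt_gv (-1) 0 grid + alt_gv 1 0 grid + alt_gv 0 (-1) grid + alt_gv 0 1 grid
        - 4 * ((grid.getD 0 []).getD 0 0)
      (max (s + init) 0, max (s + init) 0)
  | 0, j + 1 =>
      let s := alt_gv (-1) ((j : Int) + 1) grid + alt_gv 1 ((j : Int) + 1) grid
        + alt_gv 0 (j : Int) grid + alt_gv 0 ((j : Int) + 2) grid
        - 4 * ((grid.getD (j + 1) []).getD 0 0)
      (max ((bRec grid init 0 j).1 + s) 0, max ((bRec grid init 0 j).1 + s) 0)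
  | i + 1, 0 =>
      let s := alt_gv (i : Int) 0 grid + alt_gv ((i : Int) + 2) 0 grid
        + alt_gv ((i : Int) + 1) (-1) grid + alt_gv ((i : Int) + 1) 1 grid
        - 4 * ((grid.getD 0 []).getD (i + 1) 0)
      (max ((bRec grid init i 0).1 + s) 0, max ((bRec grid init i 0).1 + s) 0)
  | i + 1, j + 1 =>
      let s := alt_gv (i : Int) ((j : Int) + 1) grid + alt_gv ((i : Int) + 2) ((j : Int) + 1) grid
        + alt_gv ((i : Int) + 1) (j : Int) grid + alt_gv ((i : Int) + 1) ((j : Int) + 2) grid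
        - 4 * ((grid.getD (j + 1) []).getD (i + 1) 0)
      (max (max (bRec grid init (i + 1) j).1 (bRec grid init i (j + 1)).1 + s) 0,
       max (min (bRec grid init (i + 1) j).2 (bRec grid init i (j + 1)).2 + s) 0)
  termination_by i j => i + j

-- literal port of B: the final max/min over the recursion's values
-- (Python's nested max()/min() generators; getD 0 unreachable inside Pre_).
def max_stimulation_alt (n : Int) (m : Int) (init_stimulation : Int) (grid : List (List Int)) : Int × Int :=
  ((PySem.List.max? ((List.range m.toNat).map fun j =>
      (PySem.List.max? ((List.range n.toNat).map fun i =>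
        (bRec grid init_stimulation i j).1) (fun y => y)).getD 0) (fun y => y)).getD 0,
   (PySem.List.min? ((List.range m.toNat).map fun j =>
      (PySem.List.min? ((List.range n.toNat).map fun i =>
        (bRec grid init_stimulation i j).2) (fun y => y)).getD 0) (fun y => y)).getD 0)

-- ===== PRECONDITION & SPEC =====

-- Pre_ is exactly the set of inputs on which the Python A returns (fuzz-verified): it fails
-- precisely where A raises (IndexError): n < 1 or m < 1 (max_ps[0][0] / max() on empty), fewer
-- than m rows, or a row too short for the cells the stencil actually touches (rows 0..m-1 need
-- max(n, min(n+1, len(grid[0]))) entries, row m — read as a down-neighbour — needs n).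
def Pre_max_stimulation (n : Int) (m : Int) (init_stimulation : Int) (grid : List (List Int)) : Prop :=
  1 ≤ n ∧ 1 ≤ m ∧ m ≤ (grid.length : Int) ∧ n ≤ ((grid.headD []).length : Int) ∧
  (∀ j < m.toNat, max n (min (n + 1) ((grid.headD []).length : Int)) ≤ ((grid.getD j []).length : Int)) ∧
  (m < (grid.length : Int) → n ≤ ((grid.getD m.toNat []).length : Int))
instance (n : Int) (m : Int) (init_stimulation : Int) (grid : List (List Int)) : Decidable (Pre_max_stimulation n m init_stimulation grid) := by unfold Pre_max_stimulation; infer_instance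

def pvWitness_max_stimulation : Int × Int × Int × List (List Int) := (1, 1, 0, [[0]])

def Spec_max_stimulation (n : Int) (m : Int) (init_stimulation : Int) (grid : List (List Int)) (out : Int × Int) : Prop := out = max_stimulation_alt n m init_stimulation grid
instance (n : Int) (m : Int) (init_stimulation : Int) (grid : List (List Int)) (out : Int × Int) : Decidable (Spec_max_stimulation n m init_stimulation grid out) := by unfold Spec_max_stimulation; infer_instance

-- ===== CLAIM (what is proved, stated in full; the proofs are below) =====
def Claim_equal_max_stimulation : Prop := ∀ (n : Int) (m : Int) (init_stimulation : Int) (grid : List (List Int)), Dom_max_stimulation n m init_stimulation grid → Pre_max_stimulation n m init_stimulation grid → Spec_max_stimulation n m init_stimulation grid (max_stimulation n m init_stimulation grid)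

-- ===== LEMMAS AND PROOFS =====

-- the stencil value of cell (column i, row j), as A computes it (alt_gv = get_grid_value by rfl)
def stv (grid : List (List Int)) (i : Nat) (j : Nat) : Int :=
  get_grid_value ((i : Int) - 1) (j : Int) grid + get_grid_value ((i : Int) + 1) (j : Int) grid
    + get_grid_value (i : Int) ((j : Int) - 1) grid + get_grid_value (i : Int) ((j : Int) + 1) grid
    - 4 * ((grid.getD j []).getD i 0)

-- bRec's inline stencils, rewritten through stv
theorem bRec_zero_zero (grid : List (List Int)) (init : Int) :
    bRec grid init 0 0 = (max (stv grid 0 0 + init) 0, max (stv grid 0 0 + init) 0) := by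
  rw [bRec]; rfl

theorem bRec_zero_succ (grid : List (List Int)) (init : Int) (j : Nat) :
    bRec grid init 0 (j + 1) =
      (max ((bRec grid init 0 j).1 + stv grid 0 (j + 1)) 0,
       max ((bRec grid init 0 j).1 + stv grid 0 (j + 1)) 0) := by
  rw [bRec]
  have : stv grid 0 (j + 1) = alt_gv (-1) ((j : Int) + 1) grid + alt_gv 1 ((j : Int) + 1) grid
      + alt_gv 0 (j : Int) grid + alt_gv 0 ((j : Int) + 2) grid
      - 4 * ((grid.getD (j + 1) []).getD 0 0) := by
    unfold stv get_grid_value alt_gv; push_cast; ring_nf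
  rw [this]

theorem bRec_succ_zero (grid : List (List Int)) (init : Int) (i : Nat) :
    bRec grid init (i + 1) 0 =
      (max ((bRec grid init i 0).1 + stv grid (i + 1) 0) 0,
       max ((bRec grid init i 0).1 + stv grid (i + 1) 0) 0) := by
  rw [bRec]
  have : stv grid (i + 1) 0 = alt_gv (i : Int) 0 grid + alt_gv ((i : Int) + 2) 0 grid
      + alt_gv ((i : Int) + 1) (-1) grid + alt_gv ((i : Int) + 1) 1 grid
      - 4 * ((grid.getD 0 []).getD (i + 1) 0) := by
    unfold stv get_grid_value alt_gv; push_cast; ring_nf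
  rw [this]

theorem bRec_succ_succ (grid : List (List Int)) (init : Int) (i j : Nat) :
    bRec grid init (i + 1) (j + 1) =
      (max (max (bRec grid init (i + 1) j).1 (bRec grid init i (j + 1)).1 + stv grid (i + 1) (j + 1)) 0,
       max (min (bRec grid init (i + 1) j).2 (bRec grid init i (j + 1)).2 + stv grid (i + 1) (j + 1)) 0) := by
  rw [bRec]
  have : stv grid (i + 1) (j + 1) = alt_gv (i : Int) ((j : Int) + 1) grid
      + alt_gv ((i : Int) + 2) ((j : Int) + 1) grid
      + alt_gv ((i : Int) + 1) (j : Int) grid + alt_gv ((i : Int) + 1) ((j : Int) + 2) grid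
      - 4 * ((grid.getD (j + 1) []).getD (i + 1) 0) := by
    unfold stv get_grid_value alt_gv; push_cast; ring_nf
  rw [this]

-- ---- table toolkit ----

def Cell (t : List (List Int)) (i j : Nat) : Int := (t.getD j []).getD i 0

def Dims (N M : Nat) (t : List (List Int)) : Prop :=
  t.length = M ∧ ∀ r ∈ t, r.length = N

theorem dims_replicate (N M : Nat) : Dims N M (List.replicate M (List.replicate N (0 : Int))) := by
  refine ⟨by simp, fun r hr => ?_⟩
  rw [List.eq_of_mem_replicate hr]; simp

theorem cell_replicate (N M i j : Nat) :
    Cell (List.replicate M (List.replicate N (0 : Int))) i j = 0 := by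
  unfold Cell
  by_cases hj : j < M
  · rw [List.getD_eq_getElem _ [] (by simpa using hj)]
    simp
  · rw [List.getD_eq_default _ [] (by simpa using hj)]
    simp

theorem dims_pySet2 (N M : Nat) (t : List (List Int)) (j i : Nat) (v : Int)
    (h : Dims N M t) : Dims N M (pySet2 t j i v) := by
  by_cases hj : j < t.length
  · refine ⟨by simp [pySet2, h.1], fun r hr => ?_⟩
    rcases List.mem_or_eq_of_mem_set hr with h1 | h1
    · exact h.2 r h1
    · subst h1
      rw [List.length_set, List.getD_eq_getElem t [] hj]
      exact h.2 _ (List.getElem_mem hj)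
  · unfold pySet2
    rw [List.set_eq_of_length_le (by omega)]
    exact h

theorem row_len (N M : Nat) (t : List (List Int)) (h : Dims N M t) (j : Nat) (hj : j < M) :
    (t.getD j []).length = N := by
  have hj' : j < t.length := by rw [h.1]; omega
  rw [List.getD_eq_getElem t [] hj']
  exact h.2 _ (List.getElem_mem hj')

theorem cell_pySet2_self (t : List (List Int)) (j i : Nat) (v : Int)
    (hj : j < t.length) (hi : i < (t.getD j []).length) :
    Cell (pySet2 t j i v) i j = v := by
  unfold Cell pySet2
  have h1 : (t.set j ((t.getD j []).set i v)).getD j [] = (t.getD j []).set i v := by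
    rw [List.getD_eq_getElem _ [] (by rw [List.length_set]; exact hj), List.getElem_set_self]
  rw [h1, List.getD_eq_getElem _ 0 (by rw [List.length_set]; exact hi), List.getElem_set_self]

theorem cell_pySet2_ne (t : List (List Int)) (j i j' i' : Nat) (v : Int)
    (h : j' ≠ j ∨ i' ≠ i) :
    Cell (pySet2 t j i v) i' j' = Cell t i' j' := by
  unfold Cell pySet2
  by_cases hjj : j' = j
  · subst hjj
    rcases h with h | h
    · omega
    · by_cases hj : j' < t.length
      · have h1 : (t.set j' ((t.getD j' []).set i v)).getD j' [] = (t.getD j' []).set i v := by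
          rw [List.getD_eq_getElem _ [] (by rw [List.length_set]; exact hj), List.getElem_set_self]
        rw [h1, List.getD_eq_getElem?_getD, List.getElem?_set_ne (by omega),
          ← List.getD_eq_getElem?_getD]
      · rw [List.set_eq_of_length_le (by omega)]
  · have h2 : (t.set j ((t.getD j []).set i v)).getD j' [] = t.getD j' [] := by
      rw [List.getD_eq_getElem?_getD, List.getElem?_set_ne (by omega), ← List.getD_eq_getElem?_getD]
    rw [h2]

theorem pySet2_clamp (t : List (List Int)) (j i : Nat) (v : Int)
    (hj : j < t.length) (hi : i < (t.getD j []).length) :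
    pySet2 (pySet2 t j i v) j i (max (((pySet2 t j i v).getD j []).getD i 0) 0)
      = pySet2 t j i (max v 0) := by
  have hcell : (((pySet2 t j i v).getD j []).getD i 0) = v := cell_pySet2_self t j i v hj hi
  rw [hcell]
  unfold pySet2
  have h1 : (t.set j ((t.getD j []).set i v)).getD j [] = (t.getD j []).set i v := by
    rw [List.getD_eq_getElem _ [] (by rw [List.length_set]; exact hj), List.getElem_set_self]
  rw [h1, List.set_set, List.set_set]

theorem table_eq (N M : Nat) (t : List (List Int)) (f : Nat → Nat → Int) (h : Dims N M t)
    (hc : ∀ i j, i < N → j < M → Cell t i j = f i j) :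
    t = (List.range M).map fun j => (List.range N).map fun i => f i j := by
  apply List.ext_getElem (by simp [h.1])
  intro j hj1 hj2
  have hjM : j < M := by simpa [h.1] using hj1
  have hrow : t[j].length = N := h.2 _ (List.getElem_mem hj1)
  simp only [List.getElem_map, List.getElem_range]
  apply List.ext_getElem (by simpa using hrow)
  intro i hi1 hi2
  have hiN : i < N := by omega
  have := hc i j hiN hjM
  unfold Cell at this
  rw [List.getD_eq_getElem t [] hj1, List.getD_eq_getElem _ 0 (by omega)] at this
  simpa using this

-- ---- the grid_st fill ----

theorem aFillRow_spec (grid : List (List Int)) (N M i : Nat) (hi : i < N) (J : Nat) (hJ : J ≤ M)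
    (g : List (List Int)) (hg : Dims N M g) :
    Dims N M (aFillRow grid i J g) ∧
    ∀ i' j', Cell (aFillRow grid i J g) i' j' =
      if i' = i ∧ j' < J then stv grid i' j' else Cell g i' j' := by
  induction J with
  | zero =>
    refine ⟨hg, fun i' j' => ?_⟩
    rw [if_neg (by omega)]
    rfl
  | succ J ih =>
    obtain ⟨ihd, ihc⟩ := ih (by omega)
    rw [show aFillRow grid i (J + 1) g = pySet2 (aFillRow grid i J g) J i (stv grid i J) from by
      unfold aFillRow; rw [List.range_succ, List.foldl_append]; rfl]
    refine ⟨dims_pySet2 _ _ _ _ _ _ ihd, fun i' j' => ?_⟩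
    by_cases hsame : j' = J ∧ i' = i
    · obtain ⟨rfl, rfl⟩ := hsame
      rw [cell_pySet2_self _ _ _ _ (by rw [ihd.1]; omega)
        (by rw [row_len N M _ ihd j' (by omega)]; omega)]
      rw [if_pos ⟨rfl, by omega⟩]
    · have hne : j' ≠ J ∨ i' ≠ i := by tauto
      rw [cell_pySet2_ne _ _ _ _ _ _ hne, ihc i' j']
      by_cases h1 : i' = i ∧ j' < J
      · rw [if_pos h1, if_pos ⟨h1.1, by omega⟩]
      · have h2 : ¬(i' = i ∧ j' < J + 1) := by
          rintro ⟨rfl, hlt⟩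
          rcases hne with h | h
          · exact h1 ⟨rfl, by omega⟩
          · exact h rfl
        rw [if_neg h1, if_neg h2]

theorem aFill_spec (grid : List (List Int)) (N M I : Nat) (hI : I ≤ N) :
    Dims N M ((List.range I).foldl (fun g i => aFillRow grid i M g)
        (List.replicate M (List.replicate N (0 : Int)))) ∧
    ∀ i' j', Cell ((List.range I).foldl (fun g i => aFillRow grid i M g)
        (List.replicate M (List.replicate N (0 : Int)))) i' j' =
      if i' < I ∧ j' < M then stv grid i' j' else 0 := by
  induction I with
  | zero =>
    refine ⟨dims_replicate N M, fun i' j' => ?_⟩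
    rw [if_neg (by omega)]
    exact cell_replicate N M i' j'
  | succ I ih =>
    obtain ⟨ihd, ihc⟩ := ih (by omega)
    rw [List.range_succ, List.foldl_append]
    simp only [List.foldl_cons, List.foldl_nil]
    obtain ⟨hd, hc⟩ := aFillRow_spec grid N M I (by omega) M (le_refl M) _ ihd
    refine ⟨hd, fun i' j' => ?_⟩
    rw [hc i' j', ihc i' j']
    by_cases h1 : i' = I ∧ j' < M
    · rw [if_pos h1, if_pos ⟨by omega, h1.2⟩]
    · rw [if_neg h1]
      by_cases h2 : i' < I ∧ j' < M
      · rw [if_pos h2, if_pos ⟨by omega, h2.2⟩]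
      · rw [if_neg h2, if_neg (by omega)]

-- ---- A's DP loop ----

theorem aCol_succ (gst : List (List Int)) (i J : Nat) (t0 : List (List Int) × List (List Int)) :
    aCol gst i (J + 1) t0 =
      (fun (t : List (List Int) × List (List Int)) (j : Nat) =>
        if i = 0 ∧ j = 0 then t
        else
          let t1 :=
            if i = 0 then
              let v := (t.1.getD (j - 1) []).getD 0 0 + (gst.getD j []).getD 0 0
              (pySet2 t.1 j 0 v, pySet2 t.2 j 0 v)
            else if j = 0 then
              let v := (t.1.getD 0 []).getD (i - 1) 0 + (gst.getD 0 []).getD i 0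
              (pySet2 t.1 0 i v, pySet2 t.2 0 i v)
            else
              (pySet2 t.1 j i (max ((t.1.getD (j - 1) []).getD i 0) ((t.1.getD j []).getD (i - 1) 0)
                 + (gst.getD j []).getD i 0),
               pySet2 t.2 j i (min ((t.2.getD (j - 1) []).getD i 0) ((t.2.getD j []).getD (i - 1) 0)
                 + (gst.getD j []).getD i 0))
          (pySet2 t1.1 j i (max ((t1.1.getD j []).getD i 0) 0),
           pySet2 t1.2 j i (max ((t1.2.getD j []).getD i 0) 0))) (aCol gst i J t0) J := by
  unfold aCol
  rw [List.range_succ, List.foldl_append]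
  rfl

theorem step_cells (grid : List (List Int)) (init : Int) (N M i0 J : Nat)
    (hi0 : i0 < N) (hJM : J < M)
    (tJ1 tJ2 : List (List Int)) (hd1 : Dims N M tJ1) (hd2 : Dims N M tJ2)
    (ihc : ∀ i j, i < N → j < M → (i < i0 ∨ (i = i0 ∧ j < J) ∨ (i = 0 ∧ j = 0)) →
      Cell tJ1 i j = (bRec grid init i j).1 ∧ Cell tJ2 i j = (bRec grid init i j).2)
    (w1 w2 : Int) (hw1 : w1 = (bRec grid init i0 J).1) (hw2 : w2 = (bRec grid init i0 J).2) :
    Dims N M (pySet2 tJ1 J i0 w1) ∧ Dims N M (pySet2 tJ2 J i0 w2) ∧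
    ∀ i j, i < N → j < M → (i < i0 ∨ (i = i0 ∧ j < J + 1) ∨ (i = 0 ∧ j = 0)) →
      Cell (pySet2 tJ1 J i0 w1) i j = (bRec grid init i j).1 ∧
      Cell (pySet2 tJ2 J i0 w2) i j = (bRec grid init i j).2 := by
  refine ⟨dims_pySet2 _ _ _ _ _ _ hd1, dims_pySet2 _ _ _ _ _ _ hd2, fun i j hi hj hcov => ?_⟩
  by_cases hsame : j = J ∧ i = i0
  · obtain ⟨rfl, rfl⟩ := hsame
    constructor
    · rw [cell_pySet2_self _ _ _ _ (by rw [hd1.1]; omega)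
        (by rw [row_len N M _ hd1 j hJM]; omega), hw1]
    · rw [cell_pySet2_self _ _ _ _ (by rw [hd2.1]; omega)
        (by rw [row_len N M _ hd2 j hJM]; omega), hw2]
  · have hne : j ≠ J ∨ i ≠ i0 := by tauto
    have hcov' : i < i0 ∨ (i = i0 ∧ j < J) ∨ (i = 0 ∧ j = 0) := by
      rcases hcov with h | ⟨rfl, hlt⟩ | h
      · left; exact h
      · right; left
        refine ⟨rfl, ?_⟩
        rcases hne with h | h
        · omega
        · omega
      · right; right; exact h
    exact ⟨by rw [cell_pySet2_ne _ _ _ _ _ _ hne]; exact (ihc i j hi hj hcov').1,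
      by rw [cell_pySet2_ne _ _ _ _ _ _ hne]; exact (ihc i j hi hj hcov').2⟩

theorem aCol_spec (grid : List (List Int)) (init : Int) (N M : Nat) (gst : List (List Int))
    (hgst : ∀ i j, i < N → j < M → Cell gst i j = stv grid i j)
    (i0 : Nat) (hi0 : i0 < N) (J : Nat) (hJ : J ≤ M)
    (t0 : List (List Int) × List (List Int))
    (h1 : Dims N M t0.1) (h2 : Dims N M t0.2)
    (hc : ∀ i j, i < N → j < M → (i < i0 ∨ (i = 0 ∧ j = 0)) →
      Cell t0.1 i j = (bRec grid init i j).1 ∧ Cell t0.2 i j = (bRec grid init i j).2) :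
    Dims N M (aCol gst i0 J t0).1 ∧ Dims N M (aCol gst i0 J t0).2 ∧
    ∀ i j, i < N → j < M → (i < i0 ∨ (i = i0 ∧ j < J) ∨ (i = 0 ∧ j = 0)) →
      Cell (aCol gst i0 J t0).1 i j = (bRec grid init i j).1 ∧
      Cell (aCol gst i0 J t0).2 i j = (bRec grid init i j).2 := by
  induction J with
  | zero =>
    refine ⟨h1, h2, fun i j hi hj hcov => ?_⟩
    apply hc i j hi hj
    rcases hcov with h | h | h
    · left; exact h
    · omega
    · right; exact h
  | succ J ih =>
    obtain ⟨ihd1, ihd2, ihc⟩ := ih (by omega)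
    have hJM : J < M := by omega
    rw [aCol_succ]
    set tJ := aCol gst i0 J t0 with htJ
    dsimp only
    by_cases hcorner : i0 = 0 ∧ J = 0
    · rw [if_pos hcorner]
      refine ⟨ihd1, ihd2, fun i j hi hj hcov => ?_⟩
      apply ihc i j hi hj
      rcases hcov with h | h | h
      · left; exact h
      · right; right; omega
      · right; right; exact h
    · rw [if_neg hcorner]
      by_cases hi00 : i0 = 0
      · -- first column of the grid (i == 0): edge cell (0, J), J ≥ 1
        subst hi00
        have hJ1 : 1 ≤ J := by omega
        rw [if_pos rfl]
        dsimp only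
        have hv1 : (tJ.1.getD (J - 1) []).getD 0 0 = (bRec grid init 0 (J - 1)).1 :=
          (ihc 0 (J - 1) (by omega) (by omega) (Or.inr (Or.inl ⟨rfl, by omega⟩))).1
        have hst : (gst.getD J []).getD 0 0 = stv grid 0 J := hgst 0 J (by omega) hJM
        rw [pySet2_clamp tJ.1 J 0 _ (by rw [ihd1.1]; omega) (by rw [row_len N M _ ihd1 J hJM]; omega),
          pySet2_clamp tJ.2 J 0 _ (by rw [ihd2.1]; omega) (by rw [row_len N M _ ihd2 J hJM]; omega),
          hv1, hst]
        obtain ⟨J', rfl⟩ : ∃ J', J = J' + 1 := ⟨J - 1, by omega⟩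
        exact step_cells grid init N M 0 (J' + 1) (by omega) hJM tJ.1 tJ.2 ihd1 ihd2 ihc _ _
          (by simp [bRec_zero_succ]) (by simp [bRec_zero_succ])
      · by_cases hJ0 : J = 0
        · -- first row of the grid (j == 0): edge cell (i0, 0), i0 ≥ 1
          subst hJ0
          rw [if_neg hi00, if_pos rfl]
          dsimp only
          have hv1 : (tJ.1.getD 0 []).getD (i0 - 1) 0 = (bRec grid init (i0 - 1) 0).1 :=
            (ihc (i0 - 1) 0 (by omega) (by omega) (Or.inl (by omega))).1
          have hst : (gst.getD 0 []).getD i0 0 = stv grid i0 0 := hgst i0 0 hi0 (by omega)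
          rw [pySet2_clamp tJ.1 0 i0 _ (by rw [ihd1.1]; omega) (by rw [row_len N M _ ihd1 0 hJM]; omega),
            pySet2_clamp tJ.2 0 i0 _ (by rw [ihd2.1]; omega) (by rw [row_len N M _ ihd2 0 hJM]; omega),
            hv1, hst]
          obtain ⟨i0', rfl⟩ : ∃ i0', i0 = i0' + 1 := ⟨i0 - 1, by omega⟩
          exact step_cells grid init N M (i0' + 1) 0 hi0 hJM tJ.1 tJ.2 ihd1 ihd2 ihc _ _
            (by simp [bRec_succ_zero]) (by simp [bRec_succ_zero])
        · -- interior cell (i0, J), i0 ≥ 1, J ≥ 1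
          rw [if_neg hi00, if_neg hJ0]
          dsimp only
          have hup1 : (tJ.1.getD (J - 1) []).getD i0 0 = (bRec grid init i0 (J - 1)).1 :=
            (ihc i0 (J - 1) hi0 (by omega) (Or.inr (Or.inl ⟨rfl, by omega⟩))).1
          have hleft1 : (tJ.1.getD J []).getD (i0 - 1) 0 = (bRec grid init (i0 - 1) J).1 :=
            (ihc (i0 - 1) J (by omega) hJM (Or.inl (by omega))).1
          have hup2 : (tJ.2.getD (J - 1) []).getD i0 0 = (bRec grid init i0 (J - 1)).2 :=
            (ihc i0 (J - 1) hi0 (by omega) (Or.inr (Or.inl ⟨rfl, by omega⟩))).2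
          have hleft2 : (tJ.2.getD J []).getD (i0 - 1) 0 = (bRec grid init (i0 - 1) J).2 :=
            (ihc (i0 - 1) J (by omega) hJM (Or.inl (by omega))).2
          have hst : (gst.getD J []).getD i0 0 = stv grid i0 J := hgst i0 J hi0 hJM
          rw [pySet2_clamp tJ.1 J i0 _ (by rw [ihd1.1]; omega) (by rw [row_len N M _ ihd1 J hJM]; omega),
            pySet2_clamp tJ.2 J i0 _ (by rw [ihd2.1]; omega) (by rw [row_len N M _ ihd2 J hJM]; omega),
            hup1, hleft1, hup2, hleft2, hst]
          obtain ⟨i0', rfl⟩ : ∃ i0', i0 = i0' + 1 := ⟨i0 - 1, by omega⟩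
          obtain ⟨J', rfl⟩ : ∃ J', J = J' + 1 := ⟨J - 1, by omega⟩
          exact step_cells grid init N M (i0' + 1) (J' + 1) hi0 hJM tJ.1 tJ.2 ihd1 ihd2 ihc _ _
            (by simp [bRec_succ_succ]) (by simp [bRec_succ_succ])

theorem aLoop_spec (grid : List (List Int)) (init : Int) (N M : Nat) (gst : List (List Int))
    (hgst : ∀ i j, i < N → j < M → Cell gst i j = stv grid i j) (hM : 0 < M)
    (I : Nat) (hI : I ≤ N) (t0 : List (List Int) × List (List Int))
    (h1 : Dims N M t0.1) (h2 : Dims N M t0.2)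
    (hc : ∀ i j, i < N → j < M → (i = 0 ∧ j = 0) →
      Cell t0.1 i j = (bRec grid init i j).1 ∧ Cell t0.2 i j = (bRec grid init i j).2) :
    Dims N M (aLoop gst I M t0).1 ∧ Dims N M (aLoop gst I M t0).2 ∧
    ∀ i j, i < N → j < M → (i < I ∨ (i = 0 ∧ j = 0)) →
      Cell (aLoop gst I M t0).1 i j = (bRec grid init i j).1 ∧
      Cell (aLoop gst I M t0).2 i j = (bRec grid init i j).2 := by
  induction I with
  | zero =>
    refine ⟨h1, h2, fun i j hi hj hcov => ?_⟩
    apply hc i j hi hj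
    rcases hcov with h | h
    · omega
    · exact h
  | succ I ih =>
    obtain ⟨ihd1, ihd2, ihc⟩ := ih (by omega)
    have hstep : aLoop gst (I + 1) M t0 = aCol gst I M (aLoop gst I M t0) := by
      unfold aLoop
      rw [List.range_succ, List.foldl_append]
      rfl
    rw [hstep]
    obtain ⟨hd1, hd2, hcells⟩ := aCol_spec grid init N M gst hgst I (by omega) M (le_refl M)
      (aLoop gst I M t0) ihd1 ihd2 ihc
    refine ⟨hd1, hd2, fun i j hi hj hcov => ?_⟩
    apply hcells i j hi hj
    rcases hcov with h | h
    · by_cases h' : i < I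
      · left; exact h'
      · right; left; exact ⟨by omega, hj⟩
    · right; right; exact h

-- ===== VERDICT (by name: the statement is the Claim_ definition above) =====
theorem max_stimulation_spec : Claim_equal_max_stimulation := by
  intro n m init grid _ hpre
  obtain ⟨hn, hm, -⟩ := hpre
  unfold Spec_max_stimulation
  have hN : 0 < n.toNat := by omega
  have hM : 0 < m.toNat := by omega
  obtain ⟨hgd, hgc⟩ := aFill_spec grid n.toNat m.toNat n.toNat (le_refl _)
  have hcell : ∀ i j, i < n.toNat → j < m.toNat →
      Cell (aFill grid n.toNat m.toNat) i j = stv grid i j := by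
    intro i j hi hj
    have h := hgc i j
    rw [if_pos ⟨hi, hj⟩] at h
    exact h
  unfold max_stimulation
  dsimp only
  set c := max (((aFill grid n.toNat m.toNat).getD 0 []).getD 0 0 + init) 0 with hcdef
  have hcv : c = (bRec grid init 0 0).1 := by
    rw [hcdef, show ((aFill grid n.toNat m.toNat).getD 0 []).getD 0 0 = stv grid 0 0
      from hcell 0 0 hN hM]
    simp [bRec_zero_zero]
  have hcv2 : c = (bRec grid init 0 0).2 := by
    rw [hcv]
    simp [bRec_zero_zero]
  have hrep := dims_replicate n.toNat m.toNat
  have hb : Dims n.toNat m.toNat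
      (pySet2 (List.replicate m.toNat (List.replicate n.toNat (0 : Int))) 0 0 c) :=
    dims_pySet2 _ _ _ _ _ _ hrep
  have hbc : Cell (pySet2 (List.replicate m.toNat (List.replicate n.toNat (0 : Int))) 0 0 c) 0 0 = c :=
    cell_pySet2_self _ _ _ _ (by simp; omega) (by rw [row_len n.toNat m.toNat _ hrep 0 hM]; omega)
  obtain ⟨hd1, hd2, hcells⟩ := aLoop_spec grid init n.toNat m.toNat (aFill grid n.toNat m.toNat)
    hcell hM n.toNat (le_refl _)
    (pySet2 (List.replicate m.toNat (List.replicate n.toNat (0 : Int))) 0 0 c,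
     pySet2 (List.replicate m.toNat (List.replicate n.toNat (0 : Int))) 0 0 c)
    hb hb
    (fun i j hi hj hcor => by
      obtain ⟨rfl, rfl⟩ := hcor
      exact ⟨by rw [show Cell _ 0 0 = c from hbc, hcv], by rw [show Cell _ 0 0 = c from hbc, hcv2]⟩)
  have htab1 := table_eq n.toNat m.toNat _ (fun i j => (bRec grid init i j).1) hd1
    (fun i j hi hj => (hcells i j hi hj (Or.inl hi)).1)
  have htab2 := table_eq n.toNat m.toNat _ (fun i j => (bRec grid init i j).2) hd2
    (fun i j hi hj => (hcells i j hi hj (Or.inl hi)).2)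
  rw [htab1, htab2, List.map_map, List.map_map]
  rfl
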